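-- pv_equiv track=rewrite | github.com/raeez/chiral-bar-cobar | compute/lib/minimal_model_bar.py | minimal_model_primaries
-- ===== SOURCE A (Python) =====
-- from typing import Dict, List
--
-- def _validate_pq(p: int, q: int):
--     """Validate M(p,q) parameters."""
--     from math import gcd
--     if q < 2:
--         raise ValueError(f"q={q} < 2")
--     if p <= q:
--         raise ValueError(f"p={p} <= q={q}")
--     if gcd(p, q) != 1:
--         raise ValueError(f"gcd({p},{q}) = {gcd(p,q)} != 1")
--
-- def minimal_model_primaries(p: int, q: int) -> List:
--     """List of (r, s) labels for independent primary fields of M(p,q).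
--
--     Uses identification h_{r,s} = h_{q-r, p-s}: take the lexicographically
--     first representative.  Convention: 1 <= r <= q-1, 1 <= s <= p-1.
--     """
--     _validate_pq(p, q)
--     seen = set()
--     primaries = []
--     for r in range(1, q):
--         for s in range(1, p):
--             pair = (r, s)
--             dual = (q - r, p - s)
--             if dual not in seen:
--                 seen.add(pair)
--                 primaries.append(pair)
--     return primaries
-- ===== SOURCE B (Python) =====
-- def minimal_model_primaries(p, q):
--     """List of (r, s) labels for independent primary fields of M(p,q).
--
--     Builds the kept region directly: all rows r with 2r < q in full, plus
--     (for even q) the self-dual row r = q/2 restricted to 2s < p.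
--     """
--     from math import gcd
--     if q < 2:
--         raise ValueError(f"q={q} < 2")
--     if p <= q:
--         raise ValueError(f"p={p} <= q={q}")
--     if gcd(p, q) != 1:
--         raise ValueError(f"gcd({p},{q}) = {gcd(p,q)} != 1")
--     primaries = []
--     for r in range(1, (q + 1) // 2):
--         for s in range(1, p):
--             primaries.append((r, s))
--     if q % 2 == 0:
--         r = q // 2
--         for s in range(1, (p + 1) // 2):
--             primaries.append((r, s))
--     return primaries
-- ===== Notes on version B (the rewrite author's own statement) =====
-- stated objective: faster
-- what changed: B computes the kept Kac-table region directly (full rows with 2r<q, plus the half of the self-dual row r=q/2 with 2s<p when q is even) instead of scanning the whole (q-1)x(p-1) grid while filtering against a growing seen-set.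
import Mathlib
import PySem

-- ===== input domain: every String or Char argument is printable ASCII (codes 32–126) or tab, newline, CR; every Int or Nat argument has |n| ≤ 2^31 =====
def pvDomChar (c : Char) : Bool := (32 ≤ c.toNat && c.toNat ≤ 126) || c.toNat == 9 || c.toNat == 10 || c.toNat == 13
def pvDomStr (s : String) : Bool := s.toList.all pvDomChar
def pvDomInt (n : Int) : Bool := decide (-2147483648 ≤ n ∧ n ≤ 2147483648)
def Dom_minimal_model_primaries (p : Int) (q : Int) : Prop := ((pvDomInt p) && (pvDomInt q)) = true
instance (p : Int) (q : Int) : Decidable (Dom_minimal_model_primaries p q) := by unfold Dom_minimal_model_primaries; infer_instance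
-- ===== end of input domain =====

-- B lists the kept Kac-table region directly (rows 2r<q in full, plus the 2s<p half of the
-- self-dual row r=q/2 when q is even) instead of scanning the whole grid with a seen-set.

-- ===== PORT A =====
-- inner loop body: pair = (r,s); dual = (q-r, p-s); if dual not in seen: seen.add(pair); primaries.append(pair)
def pvInnerA (q p r : Int) (st : PySem.Set (Int × Int) × List (Int × Int)) (s : Int) :
    PySem.Set (Int × Int) × List (Int × Int) :=
  let pair := (r, s)
  let dual := (q - r, p - s)
  if PySem.Set.contains st.1 dual then st
  else (PySem.Set.add st.1 pair, st.2 ++ [pair])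

-- one iteration of the outer 'for r in range(1, q)' loop
def pvRowA (q p : Int) (st : PySem.Set (Int × Int) × List (Int × Int)) (r : Int) :
    PySem.Set (Int × Int) × List (Int × Int) :=
  (PySem.List.pyRange 1 p 1).foldl (pvInnerA q p r) st

-- _validate_pq raises ValueError outside Pre_; the returning path is the grid scan below
def minimal_model_primaries (p : Int) (q : Int) : List (Int × Int) :=
  ((PySem.List.pyRange 1 q 1).foldl (pvRowA q p) (PySem.Set.ofList [], [])).2

-- ===== PORT B =====
-- validation raises ValueError outside Pre_; then the kept region is appended directly
def minimal_model_primaries_alt (p : Int) (q : Int) : List (Int × Int) :=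
  let primaries := (PySem.List.pyRange 1 (PySem.Int.floordiv (q + 1) 2) 1).foldl
    (fun acc r => (PySem.List.pyRange 1 p 1).foldl (fun acc s => acc ++ [(r, s)]) acc) []
  if PySem.Int.mod q 2 = 0 then
    (PySem.List.pyRange 1 (PySem.Int.floordiv (p + 1) 2) 1).foldl
      (fun acc s => acc ++ [(PySem.Int.floordiv q 2, s)]) primaries
  else primaries

-- ===== PRECONDITION & SPEC =====
-- Pre_: exactly where _validate_pq does not raise ValueError (q ≥ 2, p > q, gcd(p,q) = 1)
def Pre_minimal_model_primaries (p : Int) (q : Int) : Prop :=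
  2 ≤ q ∧ q < p ∧ Int.gcd p q = 1
instance (p : Int) (q : Int) : Decidable (Pre_minimal_model_primaries p q) := by
  unfold Pre_minimal_model_primaries; infer_instance

def pvWitness_minimal_model_primaries : Int × Int := (3, 2)

def Spec_minimal_model_primaries (p : Int) (q : Int) (out : List (Int × Int)) : Prop :=
  out = minimal_model_primaries_alt p q
instance (p : Int) (q : Int) (out : List (Int × Int)) : Decidable (Spec_minimal_model_primaries p q out) := by
  unfold Spec_minimal_model_primaries; infer_instance

-- ===== CLAIM (what is proved, stated in full; the proofs are below) =====
def Claim_equal_minimal_model_primaries : Prop := ∀ (p : Int) (q : Int), Dom_minimal_model_primaries p q → Pre_minimal_model_primaries p q → Spec_minimal_model_primaries p q (minimal_model_primaries p q)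

-- ===== LEMMAS AND PROOFS =====

-- the full rows lo ≤ r < hi of the Kac table
def pvBlocks (p lo hi : Int) : List (Int × Int) :=
  (PySem.List.pyRange lo hi 1).flatMap (fun r => (PySem.List.pyRange 1 p 1).map (fun s => (r, s)))

lemma mem_pvBlocks (p lo hi a b : Int) :
    (a, b) ∈ pvBlocks p lo hi ↔ (lo ≤ a ∧ a < hi ∧ 1 ≤ b ∧ b < p) := by
  simp only [pvBlocks, List.mem_flatMap, List.mem_map, PySem.List.mem_pyRange_one]
  constructor
  · rintro ⟨r, ⟨h1, h2⟩, s, ⟨h3, h4⟩, h5⟩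
    obtain ⟨rfl, rfl⟩ := Prod.mk.injEq .. ▸ h5.symm
    exact ⟨h1, h2, h3, h4⟩
  · rintro ⟨h1, h2, h3, h4⟩
    exact ⟨a, ⟨h1, h2⟩, b, ⟨h3, h4⟩, rfl⟩

-- inner loop, skipping case: every dual is already seen, so the state is unchanged
lemma pvInner_skip (q p r : Int) (L : List Int) (S : PySem.Set (Int × Int)) (acc : List (Int × Int))
    (h : ∀ s ∈ L, (q - r, p - s) ∈ S) :
    L.foldl (pvInnerA q p r) (S, acc) = (S, acc) := by
  induction L with
  | nil => rfl
  | cons s L ih =>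
    have hc : PySem.Set.contains S (q - r, p - s) = true :=
      (PySem.Set.contains_iff S _).mpr (h s (List.mem_cons_self))
    simp only [List.foldl_cons, pvInnerA, hc, if_true]
    exact ih (fun s' hs' => h s' (List.mem_cons_of_mem _ hs'))

-- inner loop, keeping case: no dual is ever seen, so every pair is appended
lemma pvInner_keep (q p r : Int) (L : List Int) (S : PySem.Set (Int × Int)) (acc : List (Int × Int))
    (hnd : L.Nodup)
    (hdS : ∀ s ∈ L, (q - r, p - s) ∉ S)
    (hdL : ∀ s ∈ L, ∀ s' ∈ L, (q - r, p - s) ≠ (r, s'))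
    (hnew : ∀ s ∈ L, (r, s) ∉ S) :
    L.foldl (pvInnerA q p r) (S, acc) =
      (S ++ L.map (fun s => (r, s)), acc ++ L.map (fun s => (r, s))) := by
  induction L generalizing S acc with
  | nil => simp
  | cons s L ih =>
    have hs : s ∈ s :: L := List.mem_cons_self
    have hc : PySem.Set.contains S (q - r, p - s) = false := by
      rw [← Bool.not_eq_true, PySem.Set.contains_iff]
      exact hdS s hs
    have hadd : PySem.Set.add S (r, s) = S ++ [(r, s)] := by
      have hc2 : PySem.Set.contains S (r, s) = false := by
        rw [← Bool.not_eq_true, PySem.Set.contains_iff]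
        exact hnew s hs
      unfold PySem.Set.add
      rw [hc2]
      simp
    simp only [List.foldl_cons, pvInnerA, hc, Bool.false_eq_true, if_false, hadd]
    rw [ih (S ++ [(r, s)]) (acc ++ [(r, s)]) (List.nodup_cons.mp hnd).2]
    · simp
    · intro s' hs'
      rw [List.mem_append]
      rintro (hin | hin)
      · exact hdS s' (List.mem_cons_of_mem _ hs') hin
      · exact hdL s' (List.mem_cons_of_mem _ hs') s hs (List.mem_singleton.mp hin)
    · intro s' hs'
      exact fun s'' hs'' => hdL s' (List.mem_cons_of_mem _ hs') s'' (List.mem_cons_of_mem _ hs'')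
    · intro s' hs'
      rw [List.mem_append]
      rintro (hin | hin)
      · exact hnew s' (List.mem_cons_of_mem _ hs') hin
      · have h1 := List.mem_singleton.mp hin
        have h2 : s' = s := by injection h1
        exact (List.nodup_cons.mp hnd).1 (h2 ▸ hs')

-- low phase: rows a .. a+n-1 all satisfy 2r < q and are kept in full
lemma pv_low_phase (q p : Int) : ∀ (n : Nat) (a : Int) (K : List (Int × Int)),
    1 ≤ a → 2 * a + 2 * n ≤ q + 1 →
    (∀ x ∈ K, x.1 < a) →
    (PySem.List.pyRange a (a + n) 1).foldl (pvRowA q p) (K, K) =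
      (K ++ pvBlocks p a (a + n), K ++ pvBlocks p a (a + n)) := by
  intro n
  induction n with
  | zero =>
    intro a K _ _ _
    simp [pvBlocks]
  | succ n ih =>
    intro a K ha hbound hK
    have hcast : (((n + 1 : Nat)) : Int) = (n : Int) + 1 := by push_cast; ring
    have hlt : a < a + ((n + 1 : Nat) : Int) := by omega
    rw [PySem.List.pyRange_one_cons hlt, List.foldl_cons]
    have hrow : pvRowA q p (K, K) a =
        (K ++ (PySem.List.pyRange 1 p 1).map (fun s => (a, s)),
         K ++ (PySem.List.pyRange 1 p 1).map (fun s => (a, s))) := by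
      unfold pvRowA
      apply pvInner_keep q p a _ K K (PySem.List.nodup_pyRange_one 1 p)
      · intro s _ hmem
        have := hK _ hmem
        simp only at this
        omega
      · intro s _ s' _ hne
        have : q - a = a := by injection hne
        omega
      · intro s _ hmem
        have := hK _ hmem
        simp only at this
        omega
    rw [hrow]
    have hK' : ∀ x ∈ K ++ (PySem.List.pyRange 1 p 1).map (fun s => (a, s)), x.1 < a + 1 := by
      intro x hx
      rcases List.mem_append.mp hx with hx | hx
      · have := hK x hx; omega
      · rcases List.mem_map.mp hx with ⟨s, _, rfl⟩
        simp
    have hstep := ih (a + 1) (K ++ (PySem.List.pyRange 1 p 1).map (fun s => (a, s)))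
      (by omega) (by omega) hK'
    have hrange : a + 1 + (n : Int) = a + ((n + 1 : Nat) : Int) := by omega
    rw [hrange] at hstep
    rw [hstep]
    have hsplit : pvBlocks p a (a + ((n + 1 : Nat) : Int)) =
        (PySem.List.pyRange 1 p 1).map (fun s => (a, s)) ++
          pvBlocks p (a + 1) (a + ((n + 1 : Nat) : Int)) := by
      unfold pvBlocks
      rw [PySem.List.pyRange_one_cons hlt, List.flatMap_cons]
    rw [hsplit, List.append_assoc]

-- high phase: rows a .. a+n-1 all have their dual already seen, nothing is added
lemma pv_high_phase (q p : Int) : ∀ (n : Nat) (a : Int) (K : List (Int × Int)),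
    (∀ r, a ≤ r → r < a + n → ∀ s, 1 ≤ s → s < p → (q - r, p - s) ∈ K) →
    (PySem.List.pyRange a (a + n) 1).foldl (pvRowA q p) (K, K) = (K, K) := by
  intro n
  induction n with
  | zero =>
    intro a K _
    simp
  | succ n ih =>
    intro a K h
    have hlt : a < a + ((n + 1 : Nat) : Int) := by omega
    rw [PySem.List.pyRange_one_cons hlt, List.foldl_cons]
    have hrow : pvRowA q p (K, K) a = (K, K) := by
      unfold pvRowA
      apply pvInner_skip
      intro s hs
      rw [PySem.List.mem_pyRange_one] at hs
      exact h a le_rfl (by omega) s hs.1 hs.2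
    rw [hrow]
    have := ih (a + 1) K (fun r hr1 hr2 => h r (by omega) (by omega))
    have hrange : a + 1 + (n : Int) = a + ((n + 1 : Nat) : Int) := by omega
    rwa [hrange] at this

-- B's port, rewritten as the canonical block form
lemma pvB_canon (p q : Int) :
    minimal_model_primaries_alt p q =
      pvBlocks p 1 (PySem.Int.floordiv (q + 1) 2) ++
        (if PySem.Int.mod q 2 = 0 then
          (PySem.List.pyRange 1 (PySem.Int.floordiv (p + 1) 2) 1).map
            (fun s => (PySem.Int.floordiv q 2, s))
        else []) := by
  unfold minimal_model_primaries_alt pvBlocks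
  simp only [PySem.List.foldl_append_singleton_eq_map]
  rw [PySem.List.foldl_append_eq_flatMap]
  split
  · simp
  · simp

-- p is odd when q is even and gcd(p,q) = 1
lemma pv_odd_p (p q : Int) (hg : Int.gcd p q = 1) (hq : q % 2 = 0) : p % 2 = 1 := by
  rcases Int.emod_two_eq_zero_or_one p with h2 | h2
  · exfalso
    have : (2 : Nat) ∣ Int.gcd p q :=
      Int.dvd_gcd (c := 2) (by exact_mod_cast (by omega : (2 : Int) ∣ p))
        (by exact_mod_cast (by omega : (2 : Int) ∣ q))
    rw [hg] at this
    norm_num at this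
  · exact h2

-- ===== VERDICT (by name: the statement is the Claim_ definition above) =====
theorem minimal_model_primaries_spec : Claim_equal_minimal_model_primaries := by
  intro p q _ hPre
  obtain ⟨hq2, hqp, hg⟩ := hPre
  unfold Spec_minimal_model_primaries
  rw [pvB_canon]
  have hmodq : PySem.Int.mod q 2 = q % 2 := PySem.Int.mod_eq_emod_of_pos (by norm_num)
  have hfd1 : PySem.Int.floordiv (q + 1) 2 = (q + 1) / 2 :=
    PySem.Int.floordiv_eq_ediv_of_pos (by norm_num)
  have hfd2 : PySem.Int.floordiv q 2 = q / 2 :=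
    PySem.Int.floordiv_eq_ediv_of_pos (by norm_num)
  have hfd3 : PySem.Int.floordiv (p + 1) 2 = (p + 1) / 2 :=
    PySem.Int.floordiv_eq_ediv_of_pos (by norm_num)
  unfold minimal_model_primaries
  rcases Int.emod_two_eq_zero_or_one q with hpar | hpar
  · -- q even, p odd
    have hpodd : p % 2 = 1 := pv_odd_p p q hg hpar
    set m : Int := q / 2 with hm
    have hm2 : 2 * m = q := by omega
    have hh : (q + 1) / 2 = m := by omega
    set h' : Int := (p + 1) / 2 with hh'
    have hh'2 : 2 * h' = p + 1 := by omega
    -- split the outer loop: rows 1..m-1, row m, rows m+1..q-1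
    rw [PySem.List.pyRange_one_append 1 m q (by omega) (by omega),
        PySem.List.pyRange_one_append m (m + 1) q (by omega) (by omega),
        PySem.List.pyRange_one_singleton, List.foldl_append, List.foldl_append]
    have hlow := pv_low_phase q p (m - 1).toNat 1 [] (by omega)
      (by omega) (by simp)
    have hcast : (1 : Int) + ((m - 1).toNat : Int) = m := by omega
    rw [hcast] at hlow
    have hofl : (PySem.Set.ofList ([] : List (Int × Int)), ([] : List (Int × Int)))
        = (([] : List (Int × Int)), ([] : List (Int × Int))) := rfl
    rw [hofl, hlow]
    set K0 : List (Int × Int) := [] ++ pvBlocks p 1 m with hK0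
    have hK0' : K0 = pvBlocks p 1 m := by simp [hK0]
    -- the self-dual row r = m: first half kept, second half skipped
    have hmid : pvRowA q p (K0, K0) m =
        (K0 ++ (PySem.List.pyRange 1 h' 1).map (fun s => (m, s)),
         K0 ++ (PySem.List.pyRange 1 h' 1).map (fun s => (m, s))) := by
      unfold pvRowA
      rw [PySem.List.pyRange_one_append 1 h' p (by omega) (by omega), List.foldl_append]
      have hkeep := pvInner_keep q p m (PySem.List.pyRange 1 h' 1) K0 K0
        (PySem.List.nodup_pyRange_one 1 h')
        (by
          intro s _ hmem
          rw [hK0'] at hmem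
          have : q - m = m := by omega
          rw [this] at hmem
          rw [mem_pvBlocks] at hmem
          omega)
        (by
          intro s hs s' hs' hne
          rw [PySem.List.mem_pyRange_one] at hs hs'
          have h1 : q - m = m := by omega
          rw [h1] at hne
          have : p - s = s' := by injection hne
          omega)
        (by
          intro s _ hmem
          rw [hK0', mem_pvBlocks] at hmem
          omega)
      rw [hkeep]
      apply pvInner_skip
      intro s hs
      rw [PySem.List.mem_pyRange_one] at hs
      have h1 : q - m = m := by omega
      rw [h1, List.mem_append]
      right
      rw [List.mem_map]
      exact ⟨p - s, by rw [PySem.List.mem_pyRange_one]; omega, by rfl⟩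
    simp only [List.foldl_cons, List.foldl_nil]
    rw [hmid]
    set K1 : List (Int × Int) := K0 ++ (PySem.List.pyRange 1 h' 1).map (fun s => (m, s)) with hK1
    -- the remaining rows add nothing
    have hhigh := pv_high_phase q p (q - (m + 1)).toNat (m + 1) K1
      (by
        intro r hr1 hr2 s hs1 hs2
        rw [hK1, List.mem_append]
        left
        rw [hK0', mem_pvBlocks]
        omega)
    have hcast2 : m + 1 + ((q - (m + 1)).toNat : Int) = q := by omega
    rw [hcast2] at hhigh
    rw [hhigh]
    simp only [hmodq, hpar, hfd1, hfd2, hfd3, hh, hK1, hK0']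
    simp
  · -- q odd: no self-dual row
    set h : Int := (q + 1) / 2 with hh
    have hh2 : 2 * h = q + 1 := by omega
    rw [PySem.List.pyRange_one_append 1 h q (by omega) (by omega), List.foldl_append]
    have hlow := pv_low_phase q p (h - 1).toNat 1 [] (by omega)
      (by omega) (by simp)
    have hcast : (1 : Int) + ((h - 1).toNat : Int) = h := by omega
    rw [hcast] at hlow
    have hofl : (PySem.Set.ofList ([] : List (Int × Int)), ([] : List (Int × Int)))
        = (([] : List (Int × Int)), ([] : List (Int × Int))) := rfl
    rw [hofl, hlow]
    have hhigh := pv_high_phase q p (q - h).toNat h ([] ++ pvBlocks p 1 h)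
      (by
        intro r hr1 hr2 s hs1 hs2
        rw [List.nil_append, mem_pvBlocks]
        omega)
    have hcast2 : h + ((q - h).toNat : Int) = q := by omega
    rw [hcast2] at hhigh
    rw [hhigh]
    simp only [hmodq, hpar, hfd1, List.nil_append]
    norm_num
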